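-- pv_equiv track=rewrite | github.com/xTriixrx/satpy-scrapy | satpy-scrapy.py | generate_utc_range_30_step
-- ===== SOURCE A (Python) =====
-- def generate_utc_range_30_step(utcrange):
--     """
--     A function which generates a list of UTC times in steps of 30 minutes, which starts at the first argument
--     of the UTC range from the command line, and ends at the second argument of the UTC range from the same command line
--     argument.
--
--     @param utcrange: str - A string containing a start and stop UTC time in a range with a '-' as the delimiter.
--     @return utc_range: [] An list containing an enumerated set of utc times separated by a half hour.
--     """
--
--     utc_range = []
--     start = utcrange[0]
--     stop = utcrange[-1]
--
--     current = start
--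
--     while current != stop:
--         utc_range.append(current)
--         if current[-2:] == '00':
--             current = current[:2]
--             current += '30'
--         else:
--             hour = "{:02d}".format((int(current[:2]) + 1))
--             current = '00'
--             current = hour + current
--
--     utc_range.append(current)
--
--     return utc_range
-- ===== SOURCE B (Python) =====
-- def generate_utc_range_30_step(utcrange):
--     start = utcrange[0]
--     stop = utcrange[-1]
--     if start == stop:
--         return [stop]
--     t0 = int(start[:2]) * 60 + int(start[2:])
--     t1 = int(stop[:2]) * 60 + int(stop[2:])
--     return ['{:02d}{:02d}'.format(t // 60, t % 60) for t in range(t0, t1, 30)] + [stop]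
-- ===== Notes on version B (the rewrite author's own statement) =====
-- stated objective: simpler
-- what changed: B replaces A's string-rewriting while loop (branching on the minute digits and re-formatting hour strings step by step) with integer arithmetic: it parses start/stop once into minute counts and emits range(t0, t1, 30) rendered back to HHMM, with a trivial early return when start == stop.
-- outside the precondition, e.g. on generate_utc_range_30_step([' 100', ' 130']): A returns [' 100', ' 130'], B returns ['0100', ' 130']; on generate_utc_range_30_step(['0000', '0015']): A does not finish within the time limit, B returns ['0000', '0015']; on generate_utc_range_30_step(['ab00', 'ab30', '0100']): A raises ValueError, B raises ValueError
import Mathlib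
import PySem

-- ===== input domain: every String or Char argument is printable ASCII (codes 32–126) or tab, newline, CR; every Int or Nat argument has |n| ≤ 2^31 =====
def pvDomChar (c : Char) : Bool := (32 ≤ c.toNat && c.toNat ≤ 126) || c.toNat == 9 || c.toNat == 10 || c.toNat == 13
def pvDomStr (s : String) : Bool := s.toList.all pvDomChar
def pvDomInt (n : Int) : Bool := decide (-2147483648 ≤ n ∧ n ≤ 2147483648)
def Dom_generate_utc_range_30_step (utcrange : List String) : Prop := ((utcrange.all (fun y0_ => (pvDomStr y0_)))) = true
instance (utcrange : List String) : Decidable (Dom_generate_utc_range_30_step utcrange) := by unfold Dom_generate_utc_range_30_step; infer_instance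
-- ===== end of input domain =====

-- B replaces A's string-rewriting while loop by integer-minute arithmetic: a closed-form
-- range(t0, t1, 30) of minute counts rendered back to 'HHMM' (objective: simpler).

-- ===== PORT A =====
-- "{:02d}".format(n): zero-pad to width 2 (exact for every Int: only |n| < 10, n ≥ 0 gets a pad)
def pvFmt02A (n : Int) : String := if 0 ≤ n ∧ n < 10 then "0" ++ PySem.Int.toStr n else PySem.Int.toStr n
-- one iteration of A's while-body (the 'none' arm is where Python's int() raises ValueError; outside Pre_)
def pvStepA (current : String) : String :=
  if PySem.Str.slice current (some (-2)) none = "00" then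
    (PySem.Str.slice current none (some 2)) ++ "30"
  else
    match PySem.Int.ofStr? (PySem.Str.slice current none (some 2)) with
    | some h => (pvFmt02A (h + 1)) ++ "00"
    | none => current

-- A's while loop; the fuel only makes it total (under Pre_ at most 200 iterations happen, so 200 suffices)
def pvLoopA : Nat → String → String → List String → List String
  | 0, _, _, acc => acc
  | fuel + 1, current, stop, acc =>
    if current = stop then acc ++ [current]
    else pvLoopA fuel (pvStepA current) stop (acc ++ [current])

def generate_utc_range_30_step (utcrange : List String) : List String :=
  match PySem.List.pyGet? utcrange 0, PySem.List.pyGet? utcrange (-1) with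
  | some start, some stop => pvLoopA 200 start stop []
  | _, _ => []   -- IndexError (empty list); outside Pre_

-- ===== PORT B =====
-- B's own copy of "{:02d}".format(n)
def pvFmt02B (n : Int) : String := if 0 ≤ n ∧ n < 10 then "0" ++ PySem.Int.toStr n else PySem.Int.toStr n

def generate_utc_range_30_step_alt (utcrange : List String) : List String :=
  match PySem.List.pyGet? utcrange 0 with
  | none => []   -- IndexError; outside Pre_
  | some start =>
  match PySem.List.pyGet? utcrange (-1) with
  | none => []   -- IndexError; outside Pre_
  | some stop =>
    if start = stop then [stop]
    else
      match PySem.Int.ofStr? (PySem.Str.slice start none (some 2)) with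
      | none => [stop]   -- ValueError in Python; outside Pre_
      | some a =>
      match PySem.Int.ofStr? (PySem.Str.slice start (some 2) none) with
      | none => [stop]   -- ValueError in Python; outside Pre_
      | some b =>
      match PySem.Int.ofStr? (PySem.Str.slice stop none (some 2)) with
      | none => [stop]   -- ValueError in Python; outside Pre_
      | some c =>
      match PySem.Int.ofStr? (PySem.Str.slice stop (some 2) none) with
      | none => [stop]   -- ValueError in Python; outside Pre_
      | some d =>
        ((PySem.List.pyRange (a * 60 + b) (c * 60 + d) 30).map
          (fun t => pvFmt02B (PySem.Int.floordiv t 60) ++ pvFmt02B (PySem.Int.mod t 60))) ++ [stop]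

-- ===== PRECONDITION & SPEC =====
-- the k-th 30-minute grid time "HHMM" (k = 0 .. 199, i.e. "0000" .. "9930"); proof-side description, independent of both ports
def pvTime (k : Nat) : String :=
  String.ofList [Char.ofNat (48 + k / 20), Char.ofNat (48 + (k / 2) % 10), if k % 2 == 0 then '0' else '3', '0']

-- Pre_ excludes the empty list (A raises IndexError) and, unless start = stop (where A returns
-- immediately), any start/stop not canonical 30-minute grid times "0000".."9930": there A diverges,
-- raises ValueError, or echoes non-canonical spellings (e.g. leading spaces) that are accidents of
-- its string rewriting.
def Pre_generate_utc_range_30_step (utcrange : List String) : Prop :=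
  utcrange ≠ [] ∧
    (utcrange.headD "" = utcrange.getLastD "" ∨
      ∃ k0 ∈ List.range 200, ∃ k1 ∈ List.range 200,
        k0 ≤ k1 ∧ utcrange.headD "" = pvTime k0 ∧ utcrange.getLastD "" = pvTime k1)
instance (utcrange : List String) : Decidable (Pre_generate_utc_range_30_step utcrange) := by
  unfold Pre_generate_utc_range_30_step; infer_instance

def pvWitness_generate_utc_range_30_step : List String := ["0000", "0100"]

def Spec_generate_utc_range_30_step (utcrange : List String) (out : List String) : Prop := out = generate_utc_range_30_step_alt utcrange
instance (utcrange : List String) (out : List String) : Decidable (Spec_generate_utc_range_30_step utcrange out) := by unfold Spec_generate_utc_range_30_step; infer_instance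

-- ===== CLAIM (what is proved, stated in full; the proofs are below) =====
def Claim_equal_generate_utc_range_30_step : Prop := ∀ (utcrange : List String), Dom_generate_utc_range_30_step utcrange → Pre_generate_utc_range_30_step utcrange → Spec_generate_utc_range_30_step utcrange (generate_utc_range_30_step utcrange)

-- ===== LEMMAS AND PROOFS =====

-- reading a grid time back: makes pvTime injective on 0..199
def pvVal (s : String) : Nat :=
  match s.toList with
  | [c1, c2, c3, _] => (c1.toNat - 48) * 20 + (c2.toNat - 48) * 2 + (if c3 = '3' then 1 else 0)
  | _ => 0

set_option maxRecDepth 100000 in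
theorem pvVal_pvTime : ∀ k ∈ List.range 200, pvVal (pvTime k) = k := by decide

theorem pvTime_inj {k0 k1 : Nat} (h0 : k0 < 200) (h1 : k1 < 200) (h : pvTime k0 = pvTime k1) : k0 = k1 := by
  have := pvVal_pvTime k0 (List.mem_range.mpr h0)
  have := pvVal_pvTime k1 (List.mem_range.mpr h1)
  rw [h] at *; omega

set_option maxRecDepth 100000 in
theorem pvStepA_pvTime : ∀ k ∈ List.range 199, pvStepA (pvTime k) = pvTime (k + 1) := by decide

set_option maxRecDepth 100000 in
theorem pvParse_pvTime : ∀ k ∈ List.range 200,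
    PySem.Int.ofStr? (PySem.Str.slice (pvTime k) none (some 2)) = some ((k : Int) / 2) ∧
    PySem.Int.ofStr? (PySem.Str.slice (pvTime k) (some 2) none) = some (30 * ((k : Int) % 2)) := by decide

set_option maxRecDepth 100000 in
theorem pvCanon_pvTime : ∀ k ∈ List.range 200,
    pvFmt02B (PySem.Int.floordiv (30 * (k : Int)) 60) ++ pvFmt02B (PySem.Int.mod (30 * (k : Int)) 60) = pvTime k := by decide

theorem pvMapTimeShift (k m : Nat) :
    List.map (fun i => pvTime (k + i)) (List.range (m + 1)) =
      pvTime k :: List.map (fun i => pvTime (k + 1 + i)) (List.range m) := by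
  rw [List.range_succ_eq_map, List.map_cons, List.map_map]
  simp only [Nat.add_zero]
  congr 1
  apply List.map_congr_left
  intro i _
  show pvTime (k + (i + 1)) = pvTime (k + 1 + i)
  congr 1
  omega

theorem pvLoopA_eq : ∀ (n k : Nat) (acc : List String) (k1 : Nat), k ≤ k1 → k1 ≤ 199 → k1 - k < n →
    pvLoopA n (pvTime k) (pvTime k1) acc = acc ++ (List.range (k1 - k + 1)).map (fun i => pvTime (k + i)) := by
  intro n
  induction n with
  | zero => intro k acc k1 _ _ h; omega
  | succ n ih =>
    intro k acc k1 hk hk1 hfuel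
    by_cases heq : k = k1
    · subst heq
      simp [pvLoopA]
    · have hlt : k < k1 := lt_of_le_of_ne hk heq
      have hne : pvTime k ≠ pvTime k1 := fun h => heq (pvTime_inj (by omega) (by omega) h)
      rw [pvLoopA, if_neg hne, pvStepA_pvTime k (List.mem_range.mpr (by omega)),
          ih (k + 1) (acc ++ [pvTime k]) k1 (by omega) hk1 (by omega)]
      have h2 : k1 - k + 1 = (k1 - (k + 1) + 1) + 1 := by omega
      rw [h2, pvMapTimeShift, List.append_assoc, List.singleton_append, pvMapTimeShift, pvMapTimeShift]

theorem pvHead_last {u : List String} (hu : u ≠ []) :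
    PySem.List.pyGet? u 0 = some (u.headD "") ∧ PySem.List.pyGet? u (-1) = some (u.getLastD "") := by
  constructor
  · rw [PySem.List.pyGet?_zero]
    cases u with
    | nil => exact absurd rfl hu
    | cons a l => simp
  · rw [PySem.List.pyGet?_neg_one]
    cases u with
    | nil => exact absurd rfl hu
    | cons a l =>
        rw [List.getLastD_eq_getLast?]
        cases hx : (a :: l).getLast? with
        | none => simp at hx
        | some x => rfl

-- ===== VERDICT (by name: the statement is the Claim_ definition above) =====
set_option maxHeartbeats 1000000 in
theorem generate_utc_range_30_step_spec : Claim_equal_generate_utc_range_30_step := by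
  intro u _ hpre
  obtain ⟨hu, hcase⟩ := hpre
  obtain ⟨h0, h1⟩ := pvHead_last hu
  unfold Spec_generate_utc_range_30_step generate_utc_range_30_step generate_utc_range_30_step_alt
  rw [h0, h1]
  dsimp only
  rcases hcase with heq | ⟨k0, hk0, k1, hk1, hle, hs0, hs1⟩
  · rw [heq]
    simp [pvLoopA]
  · rw [List.mem_range] at hk0 hk1
    rw [hs0, hs1]
    by_cases heq : pvTime k0 = pvTime k1
    · rw [heq]
      simp [pvLoopA]
    · have hne : k0 ≠ k1 := fun h => heq (by rw [h])
      have hlt : k0 < k1 := lt_of_le_of_ne hle hne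
      rw [if_neg heq]
      obtain ⟨ha, hb⟩ := pvParse_pvTime k0 (List.mem_range.mpr hk0)
      obtain ⟨hc, hd⟩ := pvParse_pvTime k1 (List.mem_range.mpr hk1)
      rw [ha, hb, hc, hd]
      dsimp only
      have e0 : (k0 : Int) / 2 * 60 + 30 * ((k0 : Int) % 2) = 30 * k0 := by omega
      have e1 : (k1 : Int) / 2 * 60 + 30 * ((k1 : Int) % 2) = 30 * k1 := by omega
      rw [e0, e1, pvLoopA_eq 200 k0 [] k1 hle (by omega) (by omega)]
      rw [PySem.List.pyRange_of_pos _ _ (by norm_num)]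
      have hcnt : (if (30 * (k0 : Int)) < 30 * k1 then ((30 * (k1 : Int) - 30 * k0 + 30 - 1) / 30).toNat else 0) = k1 - k0 := by
        rw [if_pos (by omega)]; omega
      rw [hcnt]
      rw [List.range_succ, List.map_append, List.map_map]
      simp only [List.nil_append, List.map_singleton, Function.comp_def]
      have hmap : (List.range (k1 - k0)).map
            (fun (i : Nat) => pvFmt02B (PySem.Int.floordiv (30 * (k0 : Int) + 30 * (i : Int)) 60) ++
              pvFmt02B (PySem.Int.mod (30 * (k0 : Int) + 30 * (i : Int)) 60)) =
          (List.range (k1 - k0)).map (fun i => pvTime (k0 + i)) := by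
        apply List.map_congr_left
        intro i hi
        rw [List.mem_range] at hi
        have h30 : (30 * (k0 : Int) + 30 * (i : Int)) = 30 * ((k0 + i : Nat) : Int) := by
          push_cast; ring
        rw [h30]
        exact pvCanon_pvTime (k0 + i) (List.mem_range.mpr (by omega))
      rw [hmap]
      have hl : k0 + (k1 - k0) = k1 := by omega
      rw [hl]
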